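-- pv_equiv track=rewrite | github.com/ahesselgesser/TeamAAA | mysite/core/paser/main_parser.py | assessmentMethodProcessor
-- ===== SOURCE A (Python) =====
-- def assessmentMethodProcessor(assessment_methods):
--     output = []
--     temp = []
--     for item in assessment_methods:
--         if (type(item) == str and item.startswith("SLO")):
--             if (len(temp) != 0):
--                 output.append(temp)
--                 temp = []
--         temp.append(item)
--     output.append(temp)
--     return output
-- ===== SOURCE B (Python) =====
-- def assessmentMethodProcessor(assessment_methods):
--     # Back-to-front single pass: scan the list in reverse, collecting the open
--     # group; a marker seals it (the group includes the marker). Accumulators are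
--     # kept reversed so only O(1) amortized appends are needed.
--     open_rev = []    # current open group, in reverse order
--     sealed_rev = []  # sealed groups, most recently sealed first
--     for item in reversed(assessment_methods):
--         if type(item) == str and item.startswith("SLO"):
--             sealed_rev.append([item] + open_rev[::-1])
--             open_rev = []
--         else:
--             open_rev.append(item)
--     sealed = sealed_rev[::-1]
--     if not open_rev and sealed:
--         return sealed
--     return [open_rev[::-1]] + sealed
-- ===== Notes on version B (the rewrite author's own statement) =====
-- stated objective: alternative
-- what changed: B traverses the list in reverse, building complete groups back-to-front with reversed accumulators (a marker seals the currently open group, which contains the marker itself), instead of A's forward pass that flushes a temp accumulator when a marker is met; a final fix-up for a leading group replaces A's len(temp)!=0 guard.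
import Mathlib
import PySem

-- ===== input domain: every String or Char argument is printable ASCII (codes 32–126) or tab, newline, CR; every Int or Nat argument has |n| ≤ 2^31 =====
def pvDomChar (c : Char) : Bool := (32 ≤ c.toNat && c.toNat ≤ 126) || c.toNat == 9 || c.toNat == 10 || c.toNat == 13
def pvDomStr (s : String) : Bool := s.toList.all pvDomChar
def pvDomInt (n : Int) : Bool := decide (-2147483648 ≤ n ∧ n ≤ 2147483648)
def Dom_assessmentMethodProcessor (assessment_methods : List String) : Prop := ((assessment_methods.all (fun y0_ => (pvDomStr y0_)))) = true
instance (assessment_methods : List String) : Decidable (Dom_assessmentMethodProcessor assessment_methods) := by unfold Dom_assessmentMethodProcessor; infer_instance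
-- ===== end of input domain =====

-- B rebuilds the groups back-to-front in a reversed pass (a marker seals the open
-- group) instead of A's forward flush-on-marker accumulator; same cost, alternative structure.

-- ===== PORT A =====
-- loop body of A: flush temp on an "SLO" marker (when nonempty), then append item
def pvStepA (acc : List (List String) × List String) (item : String) :
    List (List String) × List String :=
  let output := acc.1
  let temp := acc.2
  if PySem.Str.startswith item "SLO" then
    if temp.length ≠ 0 then (output ++ [temp], ([] : List String) ++ [item])
    else (output, temp ++ [item])
  else (output, temp ++ [item])

def assessmentMethodProcessor (assessment_methods : List String) : List (List String) :=
  let st := assessment_methods.foldl pvStepA ([], [])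
  st.1 ++ [st.2]

-- ===== PORT B =====
-- loop body of B: over the reversed list, with reversed accumulators; a marker
-- seals the open group (reversing it back into original order)
def pvStepB (acc : List String × List (List String)) (item : String) :
    List String × List (List String) :=
  let open_rev := acc.1
  let sealed_rev := acc.2
  if PySem.Str.startswith item "SLO" then
    (([] : List String), sealed_rev ++ [[item] ++ open_rev.reverse])
  else (open_rev ++ [item], sealed_rev)

def assessmentMethodProcessor_alt (assessment_methods : List String) : List (List String) :=
  let st := assessment_methods.reverse.foldl pvStepB ([], [])
  let sealed := st.2.reverse
  if st.1 = [] ∧ sealed ≠ [] then sealed else st.1.reverse :: sealed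

-- ===== PRECONDITION & SPEC =====
def Spec_assessmentMethodProcessor (assessment_methods : List String) (out : List (List String)) : Prop := out = assessmentMethodProcessor_alt assessment_methods
instance (assessment_methods : List String) (out : List (List String)) : Decidable (Spec_assessmentMethodProcessor assessment_methods out) := by unfold Spec_assessmentMethodProcessor; infer_instance

-- ===== CLAIM (what is proved, stated in full; the proofs are below) =====
def Claim_equal_assessmentMethodProcessor : Prop := ∀ (assessment_methods : List String), Dom_assessmentMethodProcessor assessment_methods → Spec_assessmentMethodProcessor assessment_methods (assessmentMethodProcessor assessment_methods)

-- ===== LEMMAS AND PROOFS =====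

-- abstract (prepend-style) version of B's loop body, used only in the proofs
def pvStepBAbs (acc : List String × List (List String)) (item : String) :
    List String × List (List String) :=
  if PySem.Str.startswith item "SLO" then (([] : List String), ([item] ++ acc.1) :: acc.2)
  else ([item] ++ acc.1, acc.2)

-- the real pvStepB fold is the pvStepBAbs fold with both accumulators reversed
theorem pvStepB_rev (l : List String) : ∀ (o : List String) (s : List (List String)),
    List.foldl pvStepB (o.reverse, s.reverse) l
      = ((List.foldl pvStepBAbs (o, s) l).1.reverse,
         (List.foldl pvStepBAbs (o, s) l).2.reverse) := by
  induction l with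
  | nil => intro o s; simp
  | cons x rest ih =>
    intro o s
    by_cases hs : PySem.Chars.startswith x.toList ['S', 'L', 'O'] = true
    · rw [List.foldl_cons, List.foldl_cons]
      have h1 : pvStepB (o.reverse, s.reverse) x
          = (([] : List String).reverse, ((x :: o) :: s).reverse) := by
        simp [pvStepB, hs]
      have h2 : pvStepBAbs (o, s) x = ([], (x :: o) :: s) := by
        simp [pvStepBAbs, hs]
      rw [h1, h2, ih]
    · rw [List.foldl_cons, List.foldl_cons]
      have h1 : pvStepB (o.reverse, s.reverse) x = ((x :: o).reverse, s.reverse) := by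
        simp [pvStepB, hs]
      have h2 : pvStepBAbs (o, s) x = (x :: o, s) := by
        simp [pvStepBAbs, hs]
      rw [h1, h2, ih]

-- common recursive characterisation: groups of `xs` with open accumulator `temp`
def pvAux (temp : List String) : List String → List (List String)
  | [] => [temp]
  | x :: rest =>
      if PySem.Str.startswith x "SLO" then temp :: pvAux [x] rest
      else pvAux (temp ++ [x]) rest

-- A's foldl, started with a nonempty accumulator, computes pvAux
theorem pvA_foldl (xs : List String) : ∀ (out : List (List String)) (temp : List String),
    temp ≠ [] →
    (xs.foldl pvStepA (out, temp)).1 ++ [(xs.foldl pvStepA (out, temp)).2]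
      = out ++ pvAux temp xs := by
  induction xs with
  | nil => intro out temp _; simp [pvAux]
  | cons x rest ih =>
    intro out temp h
    have ht : temp.length ≠ 0 := by simpa using h
    by_cases hs : PySem.Chars.startswith x.toList ['S', 'L', 'O'] = true
    · rw [List.foldl_cons]
      have hstep : pvStepA (out, temp) x = (out ++ [temp], ([] : List String) ++ [x]) := by
        simp [pvStepA, hs, ht]
      rw [hstep, ih (out ++ [temp]) ([] ++ [x]) (by simp)]
      simp [pvAux, hs]
    · rw [List.foldl_cons]
      have hstep : pvStepA (out, temp) x = (out, temp ++ [x]) := by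
        simp [pvStepA, hs]
      rw [hstep, ih out (temp ++ [x]) (by simp)]
      simp [pvAux, hs]

-- B's reversed foldl is a foldr; relate it to pvAux
theorem pvB_foldr (xs : List String) : ∀ (temp : List String), temp ≠ [] →
    pvAux temp xs
      = (temp ++ (xs.foldr (fun x acc => pvStepBAbs acc x) ([], [])).1)
          :: (xs.foldr (fun x acc => pvStepBAbs acc x) ([], [])).2 := by
  induction xs with
  | nil => intro temp _; simp [pvAux]
  | cons x rest ih =>
    intro temp h
    by_cases hs : PySem.Chars.startswith x.toList ['S', 'L', 'O'] = true
    · rw [List.foldr_cons]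
      have haux : pvAux temp (x :: rest) = temp :: pvAux [x] rest := by
        simp [pvAux, hs]
      rw [haux, ih ([x]) (by simp)]
      simp [pvStepBAbs, hs]
    · rw [List.foldr_cons]
      have haux : pvAux temp (x :: rest) = pvAux (temp ++ [x]) rest := by
        simp [pvAux, hs]
      rw [haux, ih (temp ++ [x]) (by simp)]
      simp [pvStepBAbs, hs]

-- ===== VERDICT (by name: the statement is the Claim_ definition above) =====
theorem assessmentMethodProcessor_spec : Claim_equal_assessmentMethodProcessor := by
  intro xs _
  unfold Spec_assessmentMethodProcessor assessmentMethodProcessor assessmentMethodProcessor_alt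
  have hrev := pvStepB_rev xs.reverse ([]) ([])
  simp only [List.reverse_nil] at hrev
  rw [hrev, List.foldl_reverse]
  simp only [List.reverse_reverse, List.reverse_eq_nil_iff]
  cases xs with
  | nil => simp
  | cons x rest =>
    have hstart : (List.foldl pvStepA ([], []) (x :: rest))
        = List.foldl pvStepA ([], [x]) rest := by
      by_cases hs : PySem.Chars.startswith x.toList ['S', 'L', 'O'] = true <;>
        simp [pvStepA, hs]
    have hA := pvA_foldl rest ([]) ([x]) (by simp)
    have hB := pvB_foldr rest ([x]) (by simp)
    rw [hstart, hA, List.nil_append, hB, List.foldr_cons]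
    by_cases hs : PySem.Chars.startswith x.toList ['S', 'L', 'O'] = true <;>
      simp [pvStepBAbs, hs]
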